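-- pv_equiv track=rewrite | github.com/ninomarlou/project-euler | 40-champernownes-constant.py | champernowne_constant
-- ===== SOURCE A (Python) =====
-- def champernowne_constant(n):
--     result = 1
--     d = ''.join([str(i) for i in range(1, n)])
--     i = 1
--     while i <= n:
--         result *= int(d[i - 1])
--         i *= 10
--     return result
-- ===== SOURCE B (Python) =====
-- def champernowne_constant(n):
--     # Digit-block arithmetic: for each power-of-10 position p <= n, skip whole
--     # blocks of equal-digit-length numbers to locate the number containing
--     # position p directly; no concatenated string is ever built.  O(log^2 n).
--     result = 1
--     p = 1
--     while p <= n: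
--         pos = p
--         d = 1      # digit length of current block
--         count = 9  # how many numbers have d digits
--         while pos > d * count:
--             pos -= d * count
--             d += 1
--             count *= 10
--         num = 10 ** (d - 1) + (pos - 1) // d
--         result *= int(str(num)[(pos - 1) % d])
--         p *= 10
--     return result
-- ===== Notes on version B (the rewrite author's own statement) =====
-- stated objective: faster
-- what changed: Instead of materializing the concatenated string of 1..n-1 and indexing into it, B locates each power-of-10 position directly by digit-block arithmetic (skip whole blocks of equal-digit-length numbers, then index into str of the single containing number), never building the sequence.
-- outside the precondition, e.g. on champernowne_constant(1): A raises IndexError, B returns 1; on champernowne_constant(10): A raises IndexError, B returns 1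
import Mathlib
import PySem

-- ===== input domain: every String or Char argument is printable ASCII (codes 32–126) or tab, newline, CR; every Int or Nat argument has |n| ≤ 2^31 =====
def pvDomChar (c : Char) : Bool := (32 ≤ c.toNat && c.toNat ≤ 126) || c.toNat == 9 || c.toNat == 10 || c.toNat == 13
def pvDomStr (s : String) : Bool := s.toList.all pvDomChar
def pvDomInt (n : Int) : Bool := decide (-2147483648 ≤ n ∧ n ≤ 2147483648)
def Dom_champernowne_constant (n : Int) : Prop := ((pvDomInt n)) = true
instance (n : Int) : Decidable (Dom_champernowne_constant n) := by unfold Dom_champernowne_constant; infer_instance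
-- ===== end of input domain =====

-- B locates each power-of-10 position by digit-block arithmetic (skipping whole blocks of
-- equal-length numbers) instead of materializing the concatenated string and indexing into
-- it (objective: faster, asymptotic).


-- ===== PORT A =====
-- while i <= n: result *= int(d[i-1]); i *= 10   (fuel only makes the recursion
-- structural; 2*n.toNat+2 exceeds the number of iterations for every n)
def pvALoop : Nat → Int → String → Int → Int → Int
  | 0, _, _, _, result => result
  | f + 1, n, d, i, result =>
    if i ≤ n then
      pvALoop f n d (i * 10)
        (result * ((PySem.Str.pyGet? d (i - 1)).bind (fun c => PySem.Int.ofChars? [c])).getD 0)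
    else result

def champernowne_constant (n : Int) : Int :=
  pvALoop ((2 * n).toNat + 2) n
    (PySem.Str.join "" ((PySem.List.pyRange 1 n 1).map PySem.Int.toStr)) 1 1

-- ===== PORT B =====
-- inner while of Source B: while pos > d*count: pos -= d*count; d += 1; count *= 10
-- (fuel pos.toNat+1 exceeds the iteration count: pos strictly shrinks each step)
def pvLocate : Nat → Int → Int → Int → Int × Int × Int
  | 0, pos, d, count => (pos, d, count)
  | f + 1, pos, d, count =>
    if d * count < pos then pvLocate f (pos - d * count) (d + 1) (count * 10)
    else (pos, d, count)

-- num = 10**(d-1) + (pos-1)//d; int(str(num)[(pos-1) % d])   (d ≥ 1 on every reachable state)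
def pvDigitAt (p : Int) : Int :=
  let t := pvLocate (p.toNat + 1) p 1 9
  let pos := t.1
  let d := t.2.1
  let num := (10 : Int) ^ (d - 1).toNat + PySem.Int.floordiv (pos - 1) d
  ((PySem.Str.pyGet? (PySem.Int.toStr num) (PySem.Int.mod (pos - 1) d)).bind
    (fun c => PySem.Int.ofChars? [c])).getD 0

-- outer while of Source B: while p <= n: result *= digit_at(p); p *= 10
def pvBOuter : Nat → Int → Int → Int → Int
  | 0, _, _, result => result
  | f + 1, n, p, result =>
    if p ≤ n then pvBOuter f n (p * 10) (result * pvDigitAt p)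
    else result

def champernowne_constant_alt (n : Int) : Int :=
  pvBOuter ((2 * n).toNat + 2) n 1 1

-- ===== PRECONDITION & SPEC =====
-- Pre_ excludes exactly n = 1 and n = 10, the two inputs on which A raises IndexError
-- (the string of 1..n-1 is one digit too short to hold the needed power-of-10 position).
def Pre_champernowne_constant (n : Int) : Prop := n ≠ 1 ∧ n ≠ 10
instance (n : Int) : Decidable (Pre_champernowne_constant n) := by
  unfold Pre_champernowne_constant; infer_instance

def pvWitness_champernowne_constant : Int := 7

def Spec_champernowne_constant (n : Int) (out : Int) : Prop := out = champernowne_constant_alt n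
instance (n : Int) (out : Int) : Decidable (Spec_champernowne_constant n out) := by
  unfold Spec_champernowne_constant; infer_instance

-- ===== CLAIM (what is proved, stated in full; the proofs are below) =====
def Claim_equal_champernowne_constant : Prop := ∀ (n : Int), Dom_champernowne_constant n → Pre_champernowne_constant n → Spec_champernowne_constant n (champernowne_constant n)

-- ===== LEMMAS AND PROOFS =====

-- every decimal rendering is nonempty
lemma pv_tdc_len (b : Nat) : ∀ (f n : Nat) (l : List Char), 1 ≤ f →
    l.length + 1 ≤ (Nat.toDigitsCore b f n l).length := by
  intro f
  induction f with
  | zero => intro n l h; omega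
  | succ f ih =>
    intro n l _
    simp only [Nat.toDigitsCore]
    split
    · simp
    · rcases Nat.eq_zero_or_pos f with hf | hf
      · subst hf; simp [Nat.toDigitsCore]
      · have := ih (n / b) (Nat.digitChar (n % b) :: l) hf
        simp only [List.length_cons] at this
        omega

lemma pv_toChars_len_pos (i : Int) : 1 ≤ (PySem.Int.toChars i).length := by
  unfold PySem.Int.toChars
  split
  · simp
  · have := pv_tdc_len 10 (i.toNat + 1) i.toNat [] (by omega)
    simpa [Nat.toDigits] using this

lemma pv_toChars_len_two (i : Int) (h : 10 ≤ i) : 2 ≤ (PySem.Int.toChars i).length := by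
  have hneg : ¬ i < 0 := by omega
  have hm : 10 ≤ i.toNat := by omega
  unfold PySem.Int.toChars
  rw [if_neg hneg]
  unfold Nat.toDigits
  obtain ⟨m, hm'⟩ : ∃ m, i.toNat = m + 10 := ⟨i.toNat - 10, by omega⟩
  rw [hm']
  simp only [Nat.toDigitsCore]
  rw [if_neg (by omega)]
  have := pv_tdc_len 10 (m + 10) ((m + 10) / 10) [Nat.digitChar ((m + 10) % 10)] (by omega)
  simp only [List.length_cons, List.length_nil] at this
  exact this

-- lower bound on the digit count: 10^e ≤ n forces at least e+1 digits
lemma pv_tdc_lower : ∀ (f n : Nat) (l : List Char) (e : Nat), 10 ^ e ≤ n → n < f →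
    l.length + e + 1 ≤ (Nat.toDigitsCore 10 f n l).length := by
  intro f
  induction f with
  | zero => intro n l e _ h; omega
  | succ f ih =>
    intro n l e he hf
    simp only [Nat.toDigitsCore]
    split
    · rename_i h0
      have h10 : n < 10 := by omega
      have he0 : e = 0 := by
        by_contra h
        have : 10 ≤ 10 ^ e := Nat.le_self_pow h 10
        omega
      simp [he0]
    · rename_i h0
      have hn10 : 10 ≤ n := by omega
      cases e with
      | zero =>
        have := ih (n / 10) (Nat.digitChar (n % 10) :: l) 0 (by omega) (by omega)
        simp only [List.length_cons] at this
        omega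
      | succ e =>
        have hle : 10 ^ e ≤ n / 10 := by
          rw [Nat.le_div_iff_mul_le (by norm_num)]
          calc 10 ^ e * 10 = 10 ^ (e + 1) := by rw [pow_succ]
          _ ≤ n := he
        have := ih (n / 10) (Nat.digitChar (n % 10) :: l) e hle (by omega)
        simp only [List.length_cons] at this
        omega

-- exact digit count of str(i): 10^e ≤ i < 10^(e+1) ⟹ e+1 digits
lemma pv_toChars_len_exact (e : Nat) (i : Int) (h1 : (10 : Int) ^ e ≤ i)
    (h2 : i < (10 : Int) ^ (e + 1)) : (PySem.Int.toChars i).length = e + 1 := by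
  have hp : (1 : Int) ≤ (10 : Int) ^ e := one_le_pow₀ (by norm_num)
  have hneg : ¬ i < 0 := by omega
  have hc1 : ((10 ^ e : Nat) : Int) = (10 : Int) ^ e := by push_cast; ring
  have hc2 : ((10 ^ (e + 1) : Nat) : Int) = (10 : Int) ^ (e + 1) := by push_cast; ring
  have h1' : 10 ^ e ≤ i.toNat := by omega
  have h2' : i.toNat < 10 ^ (e + 1) := by omega
  unfold PySem.Int.toChars
  rw [if_neg hneg]
  have hlow := pv_tdc_lower (i.toNat + 1) i.toNat [] e h1' (by omega)
  have hup := Nat.toDigits_length 10 i.toNat (e + 1) (by omega) h2'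
  unfold Nat.toDigits at hup ⊢
  simp only [List.length_nil] at hlow
  omega

-- the concatenated digit block of the integers in [a, b)
def pvBlk (a b : Int) : List Char :=
  ((PySem.List.pyRange a b 1).map PySem.Int.toChars).flatten

lemma pvBlk_append (a m b : Int) (h1 : a ≤ m) (h2 : m ≤ b) :
    pvBlk a b = pvBlk a m ++ pvBlk m b := by
  unfold pvBlk
  rw [PySem.List.pyRange_one_append a m b h1 h2, List.map_append, List.flatten_append]

lemma pvBlk_single (i : Int) : pvBlk i (i + 1) = PySem.Int.toChars i := by
  unfold pvBlk
  rw [PySem.List.pyRange_one_singleton]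
  simp

lemma pvBlk_len_ge (a b : Int) : (b - a).toNat ≤ (pvBlk a b).length := by
  have H : ∀ (k : Nat) (a : Int), (b - a).toNat ≤ k → (b - a).toNat ≤ (pvBlk a b).length := by
    intro k
    induction k with
    | zero => intro a h; omega
    | succ k ih =>
      intro a h
      by_cases hab : b ≤ a
      · have : (b - a).toNat = 0 := by omega
        omega
      · have hab : a < b := by omega
        have hsplit : pvBlk a b = PySem.Int.toChars a ++ pvBlk (a + 1) b := by
          unfold pvBlk
          rw [PySem.List.pyRange_one_cons hab]
          simp
        have h1 := pv_toChars_len_pos a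
        have h2 := ih (a + 1) (by omega)
        rw [hsplit, List.length_append]
        omega
  exact H ((b - a).toNat) a le_rfl

lemma pvBlk_len_ge_two (a b : Int) (ha : 10 ≤ a) :
    2 * (b - a).toNat ≤ (pvBlk a b).length := by
  have H : ∀ (k : Nat) (a : Int), 10 ≤ a → (b - a).toNat ≤ k → 2 * (b - a).toNat ≤ (pvBlk a b).length := by
    intro k
    induction k with
    | zero => intro a _ h; omega
    | succ k ih =>
      intro a ha h
      by_cases hab : b ≤ a
      · have : (b - a).toNat = 0 := by omega
        omega
      · have hab : a < b := by omega
        have hsplit : pvBlk a b = PySem.Int.toChars a ++ pvBlk (a + 1) b := by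
          unfold pvBlk
          rw [PySem.List.pyRange_one_cons hab]
          simp
        have h1 := pv_toChars_len_two a ha
        have h2 := ih (a + 1) (by omega) (by omega)
        rw [hsplit, List.length_append]
        omega
  exact H ((b - a).toNat) a ha le_rfl

lemma pvBlk_one_ten : (pvBlk 1 10).length = 9 := by decide

lemma pvBlk_len_mono (a m b : Int) (h1 : a ≤ m) (h2 : m ≤ b) :
    (pvBlk a m).length ≤ (pvBlk a b).length := by
  rw [pvBlk_append a m b h1 h2, List.length_append]
  omega

-- a block of numbers that all have e+1 digits has length (e+1)·(b−a)
lemma pvBlk_len_const (e : Nat) : ∀ (k : Nat) (a b : Int), (b - a).toNat ≤ k →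
    (10 : Int) ^ e ≤ a → a ≤ b → b ≤ (10 : Int) ^ (e + 1) →
    ((pvBlk a b).length : Int) = ((e : Int) + 1) * (b - a) := by
  intro k
  induction k with
  | zero =>
    intro a b hk h1 h2 h3
    have hab : a = b := by omega
    subst hab
    rw [show pvBlk a a = [] by
      unfold pvBlk; rw [PySem.List.pyRange_one_eq_nil le_rfl]; rfl]
    simp
  | succ k ih =>
    intro a b hk h1 h2 h3
    by_cases hab : b ≤ a
    · have hab' : a = b := by omega
      subst hab'
      rw [show pvBlk a a = [] by
        unfold pvBlk; rw [PySem.List.pyRange_one_eq_nil le_rfl]; rfl]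
      simp
    · have hab : a < b := by omega
      have hsplit : pvBlk a b = PySem.Int.toChars a ++ pvBlk (a + 1) b := by
        unfold pvBlk
        rw [PySem.List.pyRange_one_cons hab]
        simp
      have hlen : (PySem.Int.toChars a).length = e + 1 :=
        pv_toChars_len_exact e a h1 (by omega)
      have hrec := ih (a + 1) b (by omega) (by omega) (by omega) h3
      rw [hsplit, List.length_append, hlen]
      push_cast
      push_cast at hrec
      linarith

-- cumulative length up to the start of the (e+1)-digit block
lemma pvBlk_cum (e : Nat) :
    ((pvBlk 1 ((10 : Int) ^ (e + 1))).length : Int) =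
      ((pvBlk 1 ((10 : Int) ^ e)).length : Int) + ((e : Int) + 1) * (9 * 10 ^ e) := by
  have hp : (1 : Int) ≤ (10 : Int) ^ e := one_le_pow₀ (by norm_num)
  have hpp : (10 : Int) ^ e ≤ (10 : Int) ^ (e + 1) := by
    rw [pow_succ]; nlinarith
  rw [pvBlk_append 1 ((10 : Int) ^ e) ((10 : Int) ^ (e + 1)) hp hpp, List.length_append]
  have := pvBlk_len_const e (((10 : Int) ^ (e + 1) - (10 : Int) ^ e).toNat)
    ((10 : Int) ^ e) ((10 : Int) ^ (e + 1)) le_rfl le_rfl hpp le_rfl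
  push_cast
  rw [this, pow_succ]
  ring

-- the inner loop of B: invariant and exit condition
lemma pvLocate_spec : ∀ (f : Nat) (pos d count : Int) (e : Nat),
    d = (e : Int) + 1 → count = 9 * 10 ^ e → 1 ≤ pos → pos.toNat < f →
    ∃ e' : Nat,
      (pvLocate f pos d count).2.1 = (e' : Int) + 1 ∧
      1 ≤ (pvLocate f pos d count).1 ∧
      (pvLocate f pos d count).1 ≤ ((e' : Int) + 1) * (9 * 10 ^ e') ∧
      (pvLocate f pos d count).1 + ((pvBlk 1 ((10 : Int) ^ e')).length : Int) =
        pos + ((pvBlk 1 ((10 : Int) ^ e)).length : Int) := by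
  intro f
  induction f with
  | zero => intro pos d count e _ _ hpos hf; omega
  | succ f ih =>
    intro pos d count e hd hc hpos hf
    simp only [pvLocate]
    by_cases hcond : d * count < pos
    · rw [if_pos hcond]
      have hp : (1 : Int) ≤ (10 : Int) ^ e := one_le_pow₀ (by norm_num)
      have hdc : 9 ≤ d * count := by rw [hd, hc]; nlinarith
      obtain ⟨e', h1, h2, h3, h4⟩ := ih (pos - d * count) (d + 1) (count * 10) (e + 1)
        (by rw [hd]; push_cast; ring) (by rw [hc, pow_succ]; ring)
        (by omega) (by omega)
      refine ⟨e', h1, h2, h3, ?_⟩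
      rw [h4, pvBlk_cum e, hd, hc]
      ring
    · rw [if_neg hcond]
      exact ⟨e, hd, hpos, by rw [← hd, ← hc]; omega, rfl⟩

-- landing: the digit at position pos0 of the big block is digit (pos-1)%d of the
-- located number 10^e + (pos-1)//d
lemma pv_land (n pos0 pos : Int) (e : Nat)
    (hN : pos0 ≤ ((pvBlk 1 n).length : Int))
    (h1 : 1 ≤ pos) (h2 : pos ≤ ((e : Int) + 1) * (9 * 10 ^ e))
    (h0 : pos0 = pos + ((pvBlk 1 ((10 : Int) ^ e)).length : Int)) :
    PySem.List.pyGet? (pvBlk 1 n) (pos0 - 1) =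
      PySem.List.pyGet?
        (PySem.Int.toChars ((10 : Int) ^ e + PySem.Int.floordiv (pos - 1) ((e : Int) + 1)))
        (PySem.Int.mod (pos - 1) ((e : Int) + 1)) := by
  have hdpos : (0 : Int) < (e : Int) + 1 := by positivity
  have hp : (1 : Int) ≤ (10 : Int) ^ e := one_le_pow₀ (by norm_num)
  rw [PySem.Int.floordiv_eq_ediv_of_pos hdpos, PySem.Int.mod_eq_emod_of_pos hdpos]
  set d : Int := (e : Int) + 1 with hd
  set q : Int := (pos - 1) / d with hq
  set r : Int := (pos - 1) % d with hr
  have hqr : d * q + r = pos - 1 := Int.ediv_add_emod (pos - 1) d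
  have hr0 : 0 ≤ r := Int.emod_nonneg (pos - 1) (by omega)
  have hrd : r < d := Int.emod_lt_of_pos (pos - 1) hdpos
  have hq0 : 0 ≤ q := Int.ediv_nonneg (by omega) (by omega)
  have hqub : q < 9 * 10 ^ e := by nlinarith
  set num : Int := (10 : Int) ^ e + q with hnum
  have hnum_lb : (10 : Int) ^ e ≤ num := by omega
  have hnum_ub : num < (10 : Int) ^ (e + 1) := by rw [pow_succ]; omega
  have hlenP : ((pvBlk 1 ((10 : Int) ^ e)).length : Int) = pos0 - pos := by omega
  have hlenMid : ((pvBlk ((10 : Int) ^ e) num).length : Int) = d * q := by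
    have := pvBlk_len_const e ((num - (10 : Int) ^ e).toNat) ((10 : Int) ^ e) num
      le_rfl le_rfl hnum_lb (by omega)
    rw [this, show num - (10 : Int) ^ e = q by omega, hd]
  have hnum_lt : num < n := by
    by_contra hcon
    have hn : n ≤ num := by omega
    have hn1 : (1 : Int) ≤ n := by
      by_contra hn1
      have : pvBlk 1 n = [] := by
        unfold pvBlk; rw [PySem.List.pyRange_one_eq_nil (by omega)]; rfl
      rw [this] at hN; simp at hN; omega
    have hmono := pvBlk_len_mono 1 n num hn1 hn
    have hsp : ((pvBlk 1 num).length : Int) = (pos0 - pos) + d * q := by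
      rw [pvBlk_append 1 ((10 : Int) ^ e) num hp hnum_lb, List.length_append]
      push_cast
      omega
    omega
  have hsplit : pvBlk 1 n =
      pvBlk 1 ((10 : Int) ^ e) ++ (pvBlk ((10 : Int) ^ e) num ++
        (PySem.Int.toChars num ++ pvBlk (num + 1) n)) := by
    rw [pvBlk_append 1 ((10 : Int) ^ e) n hp (by omega),
      pvBlk_append ((10 : Int) ^ e) num n hnum_lb (by omega),
      pvBlk_append num (num + 1) n (by omega) (by omega), pvBlk_single]
  have hlen3 : (PySem.Int.toChars num).length = e + 1 :=
    pv_toChars_len_exact e num hnum_lb hnum_ub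
  -- rewrite both indices as Nat casts and walk the appends
  obtain ⟨jr, hjr⟩ : ∃ jr : Nat, r = (jr : Int) := ⟨r.toNat, by omega⟩
  have hidx : pos0 - 1 =
      (((pvBlk 1 ((10 : Int) ^ e)).length + ((pvBlk ((10 : Int) ^ e) num).length + jr) : Nat) : Int) := by
    push_cast
    omega
  rw [hsplit, hidx, hjr, PySem.List.pyGet?_natCast, PySem.List.pyGet?_natCast]
  rw [List.getElem?_append_right (by omega)]
  have hsub : (pvBlk 1 ((10 : Int) ^ e)).length + ((pvBlk ((10 : Int) ^ e) num).length + jr)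
      - (pvBlk 1 ((10 : Int) ^ e)).length = (pvBlk ((10 : Int) ^ e) num).length + jr := by omega
  rw [hsub, List.getElem?_append_right (by omega)]
  have hsub2 : (pvBlk ((10 : Int) ^ e) num).length + jr - (pvBlk ((10 : Int) ^ e) num).length = jr := by
    omega
  rw [hsub2, List.getElem?_append_left (by omega)]

-- adequacy: under Pre_, every power-of-10 position ≤ n lies inside the string A builds
lemma pv_adq (n : Int) (h1 : n ≠ 1) (h10 : n ≠ 10) :
    ∀ q : Int, (∃ k : Nat, q = (10 : Int) ^ k) → q ≤ n →
    q - 1 < ((pvBlk 1 n).length : Int) := by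
  intro q hq hqn
  obtain ⟨k, hk⟩ := hq
  have hq1 : (1 : Int) ≤ q := by
    rw [hk]; exact one_le_pow₀ (by norm_num)
  cases k with
  | zero =>
    have hq' : q = 1 := by simpa using hk
    subst hq'
    have hn2 : 2 ≤ n := by omega
    have := pvBlk_len_ge 1 n
    omega
  | succ k =>
    have h10 : (10 : Int) ≤ q := by
      rw [hk, pow_succ]
      have : (1 : Int) ≤ 10 ^ k := one_le_pow₀ (by norm_num)
      nlinarith
    have hn11 : 11 ≤ n := by omega
    have hsplit := pvBlk_append 1 10 n (by norm_num) (by omega)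
    have h2 := pvBlk_len_ge_two 10 n le_rfl
    have h9 := pvBlk_one_ten
    rw [hsplit, List.length_append, h9]
    omega

-- the digit A reads from the big string equals pvDigitAt p
lemma pv_digit_eq (n : Int) (d : String) (hd : d.toList = pvBlk 1 n)
    (hn : ∀ q : Int, (∃ k : Nat, q = (10 : Int) ^ k) → q ≤ n → q - 1 < ((pvBlk 1 n).length : Int))
    (p : Int) (hpow : ∃ k : Nat, p = (10 : Int) ^ k) (hpn : p ≤ n) :
    ((PySem.Str.pyGet? d (p - 1)).bind (fun c => PySem.Int.ofChars? [c])).getD 0 =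
      pvDigitAt p := by
  have hp1 : 1 ≤ p := by
    obtain ⟨k, hk⟩ := hpow
    rw [hk]; exact one_le_pow₀ (by norm_num)
  obtain ⟨e', he1, he2, he3, he4⟩ :=
    pvLocate_spec (p.toNat + 1) p 1 9 0 (by norm_num) (by norm_num) hp1 (by omega)
  unfold pvDigitAt
  dsimp only
  have hN : p ≤ ((pvBlk 1 n).length : Int) := by
    have := hn p hpow hpn
    omega
  have hpos0 : p = (pvLocate (p.toNat + 1) p 1 9).1 + ((pvBlk 1 ((10 : Int) ^ e')).length : Int) := by
    have h0 : pvBlk 1 ((10 : Int) ^ (0 : Nat)) = [] := by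
      unfold pvBlk; rw [PySem.List.pyRange_one_eq_nil (by norm_num)]; rfl
    rw [h0] at he4
    simp only [List.length_nil, Nat.cast_zero, add_zero] at he4
    omega
  have hland := pv_land n p (pvLocate (p.toNat + 1) p 1 9).1 e' hN he2 he3 hpos0
  have hget : PySem.Str.pyGet? d (p - 1) =
      PySem.Str.pyGet?
        (PySem.Int.toStr ((10 : Int) ^ e' + PySem.Int.floordiv ((pvLocate (p.toNat + 1) p 1 9).1 - 1) ((e' : Int) + 1)))
        (PySem.Int.mod ((pvLocate (p.toNat + 1) p 1 9).1 - 1) ((e' : Int) + 1)) := by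
    simpa [PySem.Str.pyGet?, hd, PySem.Int.toList_toStr] using hland
  rw [he1, add_sub_cancel_right, Int.toNat_natCast, hget]

-- the two outer loops agree step for step
lemma pv_outer (n : Int) (d : String) (hd : d.toList = pvBlk 1 n)
    (hn : ∀ q : Int, (∃ k : Nat, q = (10 : Int) ^ k) → q ≤ n → q - 1 < ((pvBlk 1 n).length : Int)) :
    ∀ (f : Nat) (p r : Int), (∃ k : Nat, p = (10 : Int) ^ k) →
      pvALoop f n d p r = pvBOuter f n p r := by
  intro f
  induction f with
  | zero => intro p r _; rfl
  | succ f ih =>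
    intro p r hpow
    simp only [pvALoop, pvBOuter]
    by_cases hpn : p ≤ n
    · rw [if_pos hpn, if_pos hpn, pv_digit_eq n d hd hn p hpow hpn]
      obtain ⟨k, hk⟩ := hpow
      exact ih (p * 10) _ ⟨k + 1, by rw [hk, pow_succ]⟩
    · rw [if_neg hpn, if_neg hpn]

lemma pv_d_toList (n : Int) :
    (PySem.Str.join "" ((PySem.List.pyRange 1 n 1).map PySem.Int.toStr)).toList = pvBlk 1 n := by
  rw [PySem.Str.toList_join]
  have hnil : ∀ (xss : List (List Char)), PySem.Chars.join [] xss = xss.flatten := by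
    intro xss
    induction xss with
    | nil => simp [PySem.Chars.join, List.intercalate]
    | cons x xs ih =>
      cases xs with
      | nil => simp [PySem.Chars.join, List.intercalate]
      | cons y ys =>
        simp only [PySem.Chars.join, List.intercalate, List.intersperse] at *
        simp_all
  have : ("" : String).toList = [] := rfl
  rw [this, hnil]
  unfold pvBlk
  rw [List.map_map]
  simp only [Function.comp_def, PySem.Int.toList_toStr]

-- ===== VERDICT (by name: the statement is the Claim_ definition above) =====
theorem champernowne_constant_spec : Claim_equal_champernowne_constant := by
  intro n _ hpre
  unfold Spec_champernowne_constant champernowne_constant champernowne_constant_alt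
  exact pv_outer n _ (pv_d_toList n) (pv_adq n hpre.1 hpre.2)
    ((2 * n).toNat + 2) 1 1 ⟨0, rfl⟩
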